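-- pv_equiv track=rewrite | github.com/XBattleFan/generals.io | generals_client.py | patch
-- ===== SOURCE A (Python) =====
-- def patch(old, diff):
--     out = []
--     i = 0
--     while i < len(diff):
--         if diff[i] > 0:
--             out.extend(old[len(out):len(out) + diff[i]])
--         i = i + 1
--         if i < len(diff) and diff[i] > 0:
--             out.extend(diff[i+1:i+1+diff[i]])
--             i = i + diff[i]
--         i = i + 1
--     return out
-- ===== SOURCE B (Python) =====
-- def patch(old, diff):
--     # decode pass: turn diff into a flat list of ops, then apply pass folds them
--     n = len(diff)
--     ops = []
--     i = 0
--     while i < n: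
--         ops.append(('copy', diff[i]))
--         i += 1
--         if i < n and diff[i] > 0:
--             ops.append(('insert', diff[i + 1:i + 1 + diff[i]]))
--             i += diff[i]
--         i += 1
--     out = []
--     for kind, val in ops:
--         if kind == 'copy':
--             if val > 0:
--                 out.extend(old[len(out):len(out) + val])
--         else:
--             out.extend(val)
--     return out
-- ===== Notes on version B (the rewrite author's own statement) =====
-- stated objective: alternative
-- what changed: A's single interleaved while-loop is split into a decode pass that turns diff into an explicit list of copy/insert ops and a separate fold that applies the ops to build the output.
import Mathlib
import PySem

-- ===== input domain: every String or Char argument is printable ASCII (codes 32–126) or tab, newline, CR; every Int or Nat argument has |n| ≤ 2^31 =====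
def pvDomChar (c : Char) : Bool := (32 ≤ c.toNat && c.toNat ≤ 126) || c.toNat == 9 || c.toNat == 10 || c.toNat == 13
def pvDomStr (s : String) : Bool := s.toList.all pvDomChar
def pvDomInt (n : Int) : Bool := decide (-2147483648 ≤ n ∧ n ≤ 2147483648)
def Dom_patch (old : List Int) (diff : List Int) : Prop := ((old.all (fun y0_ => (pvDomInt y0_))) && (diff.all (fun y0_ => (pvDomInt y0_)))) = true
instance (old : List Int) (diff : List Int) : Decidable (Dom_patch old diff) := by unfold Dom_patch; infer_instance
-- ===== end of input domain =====

-- B replaces A's single interleaved while-loop by a decode pass (diff → op list) plus a separate apply fold; same cost, different decomposition.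

-- ===== PORT A =====
-- A's while loop; i only ever grows (by ≥ 2 per iteration), so fuel diff.length + 1
-- makes the recursion structural without changing the computed value.
-- diff[i] is read only under the guard i < len(diff) with 0 ≤ i, so getD 0 never fires.
def patchLoopA (old diff : List Int) : Nat → Int → List Int → List Int
  | 0, _, out => out
  | fuel + 1, i, out =>
    if i < (diff.length : Int) then
      let c := (PySem.List.pyGet? diff i).getD 0
      let out1 := if c > 0 then
          out ++ PySem.List.slice old (some (out.length : Int)) (some ((out.length : Int) + c))
        else out
      let j := i + 1
      let c2 := (PySem.List.pyGet? diff j).getD 0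
      if j < (diff.length : Int) ∧ c2 > 0 then
        patchLoopA old diff fuel (j + c2 + 1)
          (out1 ++ PySem.List.slice diff (some (j + 1)) (some (j + 1 + c2)))
      else
        patchLoopA old diff fuel (j + 1) out1
    else out

def patch (old : List Int) (diff : List Int) : List Int :=
  patchLoopA old diff (diff.length + 1) 0 []

-- ===== PORT B =====
inductive POp where
  | copy : Int → POp
  | ins : List Int → POp
deriving DecidableEq, Repr

-- decode pass: B's first loop, producing the ops in order (same fuel discipline as A's loop)
def decodeLoopB (diff : List Int) : Nat → Int → List POp
  | 0, _ => []
  | fuel + 1, i =>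
    if i < (diff.length : Int) then
      let c := (PySem.List.pyGet? diff i).getD 0
      let j := i + 1
      let c2 := (PySem.List.pyGet? diff j).getD 0
      if j < (diff.length : Int) ∧ c2 > 0 then
        POp.copy c :: POp.ins (PySem.List.slice diff (some (j + 1)) (some (j + 1 + c2))) ::
          decodeLoopB diff fuel (j + c2 + 1)
      else
        POp.copy c :: decodeLoopB diff fuel (j + 1)
    else []

-- apply pass: B's second loop, a fold over the ops
def applyOp (old : List Int) (out : List Int) : POp → List Int
  | POp.copy c =>
    if c > 0 then
      out ++ PySem.List.slice old (some (out.length : Int)) (some ((out.length : Int) + c))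
    else out
  | POp.ins chunk => out ++ chunk

def patch_alt (old : List Int) (diff : List Int) : List Int :=
  (decodeLoopB diff (diff.length + 1) 0).foldl (applyOp old) []

-- ===== PRECONDITION & SPEC =====
def Spec_patch (old : List Int) (diff : List Int) (out : List Int) : Prop := out = patch_alt old diff
instance (old : List Int) (diff : List Int) (out : List Int) : Decidable (Spec_patch old diff out) := by unfold Spec_patch; infer_instance

-- ===== CLAIM (what is proved, stated in full; the proofs are below) =====
def Claim_equal_patch : Prop := ∀ (old : List Int) (diff : List Int), Dom_patch old diff → Spec_patch old diff (patch old diff)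

-- ===== LEMMAS AND PROOFS =====
theorem patchLoopA_eq_fold (old diff : List Int) :
    ∀ (fuel : Nat) (i : Int) (out : List Int),
      patchLoopA old diff fuel i out = (decodeLoopB diff fuel i).foldl (applyOp old) out := by
  intro fuel
  induction fuel with
  | zero => intro i out; rfl
  | succ n ih =>
    intro i out
    simp only [patchLoopA, decodeLoopB]
    split_ifs with h1 h2 <;>
      simp_all [List.foldl_cons, applyOp, List.append_assoc] <;>
      rw [if_neg (by omega)]

-- ===== VERDICT (by name: the statement is the Claim_ definition above) =====
theorem patch_spec : Claim_equal_patch := by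
  intro old diff _
  unfold Spec_patch patch patch_alt
  exact patchLoopA_eq_fold old diff _ 0 []
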